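-- pv_equiv track=rewrite | github.com/elifsup/MSc-Project | metrics.py | cleanup_result_first
-- ===== SOURCE A (Python) =====
-- def cleanup_result_first(output):
--     """
--     This will return the first match.
--     """
--     output_lower = output.lower()
--     keywords = {
--         '**potential issue**': 'potential issue',
--         'potential issue': 'potential issue',
--         'red flag': 'red flag',
--         '**red flag**': 'red flag'
--     }
--     # Find the position of each keyword in the text
--     positions = {keyword: output_lower.find(keyword) for keyword in keywords}
--     # Filter out keywords that are not found
--     positions = {keyword: pos for keyword, pos in positions.items() if pos != -1}
--     # If no keywords are found, return 'none'
--     if not positions: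
--         return 'none'
--     # Find the keyword with the smallest position
--     first_keyword = min(positions, key=positions.get)
--     # Return the corresponding label
--     return keywords[first_keyword]
-- ===== SOURCE B (Python) =====
-- def cleanup_result_first(output):
--     """
--     This will return the first match.
--     """
--     s = output.lower()
--     labels = {
--         '**potential issue**': 'potential issue',
--         'potential issue': 'potential issue',
--         'red flag': 'red flag',
--         '**red flag**': 'red flag'
--     }
--     # single left-to-right positional scan: the first index where any keyword
--     # starts decides the answer (no per-keyword find, no min over positions)
--     for i in range(len(s)):
--         for kw, label in labels.items():
--             if s.startswith(kw, i):
--                 return label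
--     return 'none'
-- ===== Notes on version B (the rewrite author's own statement) =====
-- stated objective: alternative
-- what changed: B replaces A's per-keyword .find table, the -1 filter and the min-by-position selection with one left-to-right positional scan that tests each keyword with startswith at every index and returns the first hit's label; correct because no keyword is a prefix of another, so the earliest matching index uniquely determines the label.
import Mathlib
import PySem

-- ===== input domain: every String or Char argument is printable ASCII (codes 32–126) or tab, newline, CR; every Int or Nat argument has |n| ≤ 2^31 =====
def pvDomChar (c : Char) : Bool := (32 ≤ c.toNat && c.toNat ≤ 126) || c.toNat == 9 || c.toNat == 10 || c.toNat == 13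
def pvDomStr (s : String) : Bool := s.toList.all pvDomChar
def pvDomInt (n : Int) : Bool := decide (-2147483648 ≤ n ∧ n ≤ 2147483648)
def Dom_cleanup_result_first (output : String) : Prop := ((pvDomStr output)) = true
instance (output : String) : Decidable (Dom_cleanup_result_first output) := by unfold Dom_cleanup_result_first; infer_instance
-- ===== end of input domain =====

-- B replaces A's per-keyword find table + min-by-position selection with a single left-to-right
-- positional scan returning the first keyword hit's label; same return value everywhere (A is total).

-- ===== PORT A =====
-- dicts are ported as association lists in insertion order, per the type convention
def cleanup_result_first (output : String) : String :=
  let output_lower := PySem.Str.lower output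
  let keywords : List (String × String) :=
    [("**potential issue**", "potential issue"),
     ("potential issue", "potential issue"),
     ("red flag", "red flag"),
     ("**red flag**", "red flag")]
  -- positions = {keyword: output_lower.find(keyword) for keyword in keywords}
  let positions : List (String × Int) :=
    keywords.map (fun kv => (kv.1, PySem.Str.find output_lower kv.1))
  -- positions = {keyword: pos for keyword, pos in positions.items() if pos != -1}
  let positions2 : List (String × Int) := positions.filter (fun kv => kv.2 != -1)
  if positions2.isEmpty then "none"
  else
    -- first_keyword = min(positions, key=positions.get): first key with minimal value,
    -- taken as the first minimal (key, pos) item (keys are distinct and in key order)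
    match PySem.List.min? positions2 (fun kv => kv.2) with
    | some kv =>
      -- return keywords[first_keyword]  (the key is always present; "" is unreachable)
      match keywords.find? (fun e => e.1 == kv.1) with
      | some e => e.2
      | none => ""
    | none => ""

-- ===== PORT B =====
-- the keyword → label mapping, in Source B's dict order
def kwLabels : List (List Char × String) :=
  [("**potential issue**".toList, "potential issue"),
   ("potential issue".toList, "potential issue"),
   ("red flag".toList, "red flag"),
   ("**red flag**".toList, "red flag")]

-- Source B's loop 'for i in range(len(s)): for kw, label in labels.items(): if s.startswith(kw, i): return label'
-- ported as structural recursion over the suffix starting at i (s.startswith(kw, i) ↔ kw is a prefix of that suffix)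
def scanB : List Char → String
  | [] => "none"
  | c :: t =>
    match kwLabels.find? (fun kl => PySem.Chars.startswith (c :: t) kl.1) with
    | some kl => kl.2
    | none => scanB t

def cleanup_result_first_alt (output : String) : String :=
  scanB (PySem.Str.lower output).toList

-- ===== PRECONDITION & SPEC =====
def Spec_cleanup_result_first (output : String) (out : String) : Prop := out = cleanup_result_first_alt output
instance (output : String) (out : String) : Decidable (Spec_cleanup_result_first output out) := by unfold Spec_cleanup_result_first; infer_instance

-- ===== CLAIM (what is proved, stated in full; the proofs are below) =====
def Claim_equal_cleanup_result_first : Prop := ∀ (output : String), Dom_cleanup_result_first output → Spec_cleanup_result_first output (cleanup_result_first output)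

-- ===== LEMMAS AND PROOFS =====

-- the outcome of A's filter + min-by-position + label lookup, as a closed decision on the four
-- find positions (-1 = absent); minpos = position of a group's earliest present keyword
def minpos (a b : Int) : Int := if a = -1 then b else if b = -1 then a else if a ≤ b then a else b

def pick (p1 p2 p3 p4 : Int) : String :=
  if minpos p1 p2 = -1 then (if minpos p3 p4 = -1 then "none" else "red flag")
  else if minpos p3 p4 = -1 then "potential issue"
  else if minpos p1 p2 ≤ minpos p3 p4 then "potential issue" else "red flag"

-- how a find position changes when one leading character is dropped
def shift (v : Int) : Int := if v = -1 then -1 else v + 1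

lemma findgo_succ (sub t : List Char) (k : Nat) :
    PySem.Chars.find.go sub t (k + 1) =
      if PySem.Chars.find.go sub t k = -1 then -1 else PySem.Chars.find.go sub t k + 1 := by
  induction t generalizing k with
  | nil => simp only [PySem.Chars.find.go]; split_ifs <;> omega
  | cons c t ih =>
    simp only [PySem.Chars.find.go]
    by_cases h : sub.isPrefixOf (c :: t)
    · rw [if_pos h, if_pos h]; split_ifs <;> omega
    · rw [if_neg h, if_neg h]; exact ih (k + 1)

lemma find_cons (c : Char) (t sub : List Char) :
    PySem.Chars.find (c :: t) sub =
      if sub.isPrefixOf (c :: t) then 0 else shift (PySem.Chars.find t sub) := by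
  simp only [PySem.Chars.find, PySem.Chars.find.go, shift]
  split_ifs <;> simp_all [findgo_succ sub t 0]

lemma shift_ge (v : Int) (h : -1 ≤ v) : -1 ≤ shift v := by unfold shift; split_ifs <;> omega

lemma shift_ne_zero (v : Int) (h : -1 ≤ v) : shift v ≠ 0 := by unfold shift; split_ifs <;> omega

lemma ite_shift_ge (b : Prop) [Decidable b] (v : Int) (hv : -1 ≤ v) :
    -1 ≤ (if b then 0 else shift v) := by
  split_ifs
  · omega
  · exact shift_ge v hv

lemma neg_one_le_minpos (a b : Int) (ha : -1 ≤ a) (hb : -1 ≤ b) : -1 ≤ minpos a b := by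
  unfold minpos; split_ifs <;> omega

lemma shift_minpos (a b : Int) (ha : -1 ≤ a) (hb : -1 ≤ b) :
    minpos (shift a) (shift b) = shift (minpos a b) := by
  unfold minpos shift; split_ifs <;> omega

-- pick only compares positions, so it is invariant under shifting all present positions by one
lemma pick_shift (a b c d : Int) (ha : -1 ≤ a) (hb : -1 ≤ b) (hc : -1 ≤ c) (hd : -1 ≤ d) :
    pick (shift a) (shift b) (shift c) (shift d) = pick a b c d := by
  unfold pick
  rw [shift_minpos a b ha hb, shift_minpos c d hc hd]
  have hP := neg_one_le_minpos a b ha hb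
  have hR := neg_one_le_minpos c d hc hd
  generalize minpos a b = P at hP ⊢
  generalize minpos c d = R at hR ⊢
  unfold shift
  split_ifs
  all_goals try rfl
  all_goals omega

-- a keyword matching at position 0 decides pick's answer (ties at equal positions go to the
-- earlier dict entry, which is exactly the keyword order of both programs)
lemma pick_hit1 (y z w : Int) (hy : -1 ≤ y) (hz : -1 ≤ z) (hw : -1 ≤ w) :
    pick 0 y z w = "potential issue" := by
  unfold pick minpos; split_ifs
  all_goals try rfl
  all_goals try omega
  all_goals exact False.elim (by assumption)

lemma pick_hit2 (x z w : Int) (hx : -1 ≤ x) (hz : -1 ≤ z) (hw : -1 ≤ w) :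
    pick x 0 z w = "potential issue" := by
  unfold pick minpos; split_ifs
  all_goals try rfl
  all_goals try omega
  all_goals exact False.elim (by assumption)

lemma pick_hit3 (x y w : Int) (hx : -1 ≤ x) (hx0 : x ≠ 0) (hy : -1 ≤ y) (hy0 : y ≠ 0)
    (hw : -1 ≤ w) : pick x y 0 w = "red flag" := by
  unfold pick minpos; split_ifs
  all_goals try rfl
  all_goals try omega
  all_goals exact False.elim (by assumption)

lemma pick_hit4 (x y z : Int) (hx : -1 ≤ x) (hx0 : x ≠ 0) (hy : -1 ≤ y) (hy0 : y ≠ 0)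
    (hz : -1 ≤ z) (hz0 : z ≠ 0) : pick x y z 0 = "red flag" := by
  unfold pick minpos; split_ifs
  all_goals try rfl
  all_goals try omega
  all_goals exact False.elim (by assumption)

lemma neg_one_le_find' (s sub : List Char) : -1 ≤ PySem.Chars.find s sub :=
  PySem.Chars.neg_one_le_find s sub

-- evaluation rules for Python min (= PySem.List.min?) over an explicit list
lemma min?_one {α κ : Type} [LT κ] [DecidableLT κ] (a : α) (key : α → κ) :
    PySem.List.min? [a] key = some a := rfl

lemma min?_cons_cons {α κ : Type} [LT κ] [DecidableLT κ] (a b : α) (t : List α) (key : α → κ) :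
    PySem.List.min? (a :: b :: t) key = PySem.List.min? ((if key b < key a then b else a) :: t) key := by
  by_cases h : key b < key a <;> simp [PySem.List.min?, h]

-- A's pipeline equals the closed decision pick applied to the four find positions
lemma A_eq_pick (output : String) :
    cleanup_result_first output =
      pick (PySem.Chars.find (PySem.Chars.lower output.toList) "**potential issue**".toList)
           (PySem.Chars.find (PySem.Chars.lower output.toList) "potential issue".toList)
           (PySem.Chars.find (PySem.Chars.lower output.toList) "red flag".toList)
           (PySem.Chars.find (PySem.Chars.lower output.toList) "**red flag**".toList) := by
  unfold cleanup_result_first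
  simp only [PySem.Str.find_eq, PySem.Str.toList_lower, List.map_cons, List.map_nil]
  generalize PySem.Chars.find (PySem.Chars.lower output.toList) "**potential issue**".toList = p1
  generalize PySem.Chars.find (PySem.Chars.lower output.toList) "potential issue".toList = p2
  generalize PySem.Chars.find (PySem.Chars.lower output.toList) "red flag".toList = p3
  generalize PySem.Chars.find (PySem.Chars.lower output.toList) "**red flag**".toList = p4
  by_cases e1 : p1 = -1 <;> by_cases e2 : p2 = -1 <;> by_cases e3 : p3 = -1 <;> by_cases e4 : p4 = -1 <;>
    simp only [pick, minpos, e1, e2, e3, e4, List.filter_cons, List.filter_nil, bne_iff_ne, ne_eq,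
      not_false_iff, not_true, if_true, if_false, List.isEmpty_cons,
      List.isEmpty_nil, min?_cons_cons, min?_one] <;>
    norm_num [min?_cons_cons, min?_one]
  all_goals try (split_ifs <;> try rfl)
  all_goals try rfl
  all_goals omega

-- B's positional scan equals the same closed decision (the induction drops one character at a
-- time; pick_shift transports the answer, the pick_hit lemmas settle a match at position 0)
lemma scan_eq_pick (L : List Char) :
    scanB L = pick (PySem.Chars.find L "**potential issue**".toList)
                   (PySem.Chars.find L "potential issue".toList)
                   (PySem.Chars.find L "red flag".toList)
                   (PySem.Chars.find L "**red flag**".toList) := by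
  induction L with
  | nil => rfl
  | cons c t ih =>
    rw [find_cons, find_cons, find_cons, find_cons]
    by_cases b1 : ("**potential issue**".toList).isPrefixOf (c :: t)
    · simp only [scanB, kwLabels, List.find?, PySem.Chars.startswith, if_true, b1]
      exact (pick_hit1 _ _ _ (ite_shift_ge _ _ (neg_one_le_find' _ _)) (ite_shift_ge _ _ (neg_one_le_find' _ _)) (ite_shift_ge _ _ (neg_one_le_find' _ _))).symm
    · by_cases b2 : ("potential issue".toList).isPrefixOf (c :: t)
      · simp only [scanB, kwLabels, List.find?, PySem.Chars.startswith, if_true, b1, b2]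
        exact (pick_hit2 _ _ _ (shift_ge _ (neg_one_le_find' _ _)) (ite_shift_ge _ _ (neg_one_le_find' _ _)) (ite_shift_ge _ _ (neg_one_le_find' _ _))).symm
      · by_cases b3 : ("red flag".toList).isPrefixOf (c :: t)
        · simp only [scanB, kwLabels, List.find?, PySem.Chars.startswith, if_true, b1, b2, b3]
          exact (pick_hit3 _ _ _ (shift_ge _ (neg_one_le_find' _ _)) (shift_ne_zero _ (neg_one_le_find' _ _))
            (shift_ge _ (neg_one_le_find' _ _)) (shift_ne_zero _ (neg_one_le_find' _ _)) (ite_shift_ge _ _ (neg_one_le_find' _ _))).symm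
        · by_cases b4 : ("**red flag**".toList).isPrefixOf (c :: t)
          · simp only [scanB, kwLabels, List.find?, PySem.Chars.startswith, if_true, b1, b2, b3, b4]
            exact (pick_hit4 _ _ _ (shift_ge _ (neg_one_le_find' _ _)) (shift_ne_zero _ (neg_one_le_find' _ _))
              (shift_ge _ (neg_one_le_find' _ _)) (shift_ne_zero _ (neg_one_le_find' _ _))
              (shift_ge _ (neg_one_le_find' _ _)) (shift_ne_zero _ (neg_one_le_find' _ _))).symm
          · simp only [scanB, kwLabels, List.find?, PySem.Chars.startswith, b1, b2, b3, b4]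
            rw [ih]
            exact (pick_shift _ _ _ _ (neg_one_le_find' _ _) (neg_one_le_find' _ _)
              (neg_one_le_find' _ _) (neg_one_le_find' _ _)).symm

-- ===== VERDICT (by name: the statement is the Claim_ definition above) =====
theorem cleanup_result_first_spec : Claim_equal_cleanup_result_first := by
  intro output _
  unfold Spec_cleanup_result_first cleanup_result_first_alt
  rw [A_eq_pick, scan_eq_pick]
  simp only [PySem.Str.toList_lower]
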